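-- pv_equiv track=rewrite | github.com/engels74/wizarr | tests/test_tooltip_css_fix.py | _extract_next_button_section
-- ===== SOURCE A (Python) =====
-- def _extract_next_button_section(html):
--     """Helper to extract the Next button section from HTML."""
--     lines = html.split("\n")
--     for i, line in enumerate(lines):
--         if 'id="next-btn"' in line:
--             # Get context around the button
--             start = max(0, i - 5)
--             end = min(len(lines), i + 10)
--             return "\n".join(lines[start:end])
--     return ""
-- ===== SOURCE B (Python) =====
-- def _extract_next_button_section(html):
--     """Helper to extract the Next button section from HTML."""
--     pos = html.find('id="next-btn"')
--     if pos == -1: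
--         return ""
--     idx = html[:pos].count("\n")  # line number of the first marker occurrence
--     lines = html.split("\n")
--     start = max(0, idx - 5)
--     end = min(len(lines), idx + 10)
--     return "\n".join(lines[start:end])
-- ===== Notes on version B (the rewrite author's own statement) =====
-- stated objective: alternative
-- what changed: Instead of splitting into lines and scanning each line for the marker, B locates the first marker occurrence character-wise with str.find and derives the line index by counting newlines before that position; the line-by-line membership scan disappears.
import Mathlib
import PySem

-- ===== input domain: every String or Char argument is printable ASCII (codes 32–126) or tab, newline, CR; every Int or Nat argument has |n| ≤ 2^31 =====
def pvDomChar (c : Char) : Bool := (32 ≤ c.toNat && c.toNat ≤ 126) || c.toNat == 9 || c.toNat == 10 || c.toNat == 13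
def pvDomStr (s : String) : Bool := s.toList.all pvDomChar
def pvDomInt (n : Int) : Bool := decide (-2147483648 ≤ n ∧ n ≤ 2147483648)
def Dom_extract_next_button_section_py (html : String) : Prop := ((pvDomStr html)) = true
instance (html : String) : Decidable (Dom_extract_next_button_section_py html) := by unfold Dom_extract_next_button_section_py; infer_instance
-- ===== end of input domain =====

-- B locates the first marker occurrence with str.find and counts newlines before it
-- instead of scanning the split lines one by one (alternative decomposition, same cost).


-- ===== PORT A =====
-- the 'for i, line in enumerate(lines): if marker in line: return …' loop
def pvALoop (lines : List String) : List (Int × String) → String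
  | [] => ""
  | (i, line) :: rest =>
    if PySem.Str.isIn "id=\"next-btn\"" line then
      let start := max 0 (i - 5)
      let stop := min (lines.length : Int) (i + 10)
      PySem.Str.join "\n" (PySem.List.slice lines (some start) (some stop))
    else pvALoop lines rest

def extract_next_button_section_py (html : String) : String :=
  let lines := (PySem.Str.split? html "\n").getD []
  pvALoop lines (PySem.List.enumerate lines 0)

-- ===== PORT B =====
def extract_next_button_section_py_alt (html : String) : String :=
  let pos := PySem.Str.find html "id=\"next-btn\""
  if pos == -1 then ""
  else
    let idx : Int := (PySem.Str.count (PySem.Str.slice html none (some pos)) "\n" : Int)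
    let lines := (PySem.Str.split? html "\n").getD []
    let start := max 0 (idx - 5)
    let stop := min (lines.length : Int) (idx + 10)
    PySem.Str.join "\n" (PySem.List.slice lines (some start) (some stop))

-- ===== PRECONDITION & SPEC =====
def Spec_extract_next_button_section_py (html : String) (out : String) : Prop := out = extract_next_button_section_py_alt html
instance (html : String) (out : String) : Decidable (Spec_extract_next_button_section_py html out) := by unfold Spec_extract_next_button_section_py; infer_instance

-- ===== CLAIM (what is proved, stated in full; the proofs are below) =====
def Claim_equal_extract_next_button_section_py : Prop := ∀ (html : String), Dom_extract_next_button_section_py html → Spec_extract_next_button_section_py html (extract_next_button_section_py html)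

-- ===== LEMMAS AND PROOFS =====

-- proof-only abbreviations: the marker as a character list, and the newline test
def pvMk : List Char := "id=\"next-btn\"".toList
def pvPc : Char → Bool := fun x => x == '\n'

-- Chars.splitOn with the one-char separator '\n' is List.splitOnP
theorem pvSplitOn_go_eq (fuel : Nat) (l cur : List Char) (acc : List (List Char))
    (h : l.length < fuel) :
    PySem.Chars.splitOn.go ['\n'] fuel l cur acc
      = acc.reverse ++ (l.splitOnP pvPc).modifyHead (cur.reverse ++ ·) := by
  induction fuel generalizing l cur acc with
  | zero => omega
  | succ fuel ih =>
    cases l with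
    | nil => rw [PySem.Chars.splitOn.go.eq_def]; simp
    | cons c rest =>
      rw [PySem.Chars.splitOn.go.eq_def]
      by_cases hc : c = '\n'
      · subst hc
        have hp : List.isPrefixOf ['\n'] ('\n' :: rest) = true := by simp [List.isPrefixOf]
        simp only [hp, if_pos]
        rw [ih _ _ _ (by simp at h ⊢; omega)]
        rw [List.splitOnP_cons]
        simp only [pvPc, beq_self_eq_true, if_pos, List.modifyHead_cons]
        simp
        cases rest.splitOnP pvPc <;> simp
      · have hp : List.isPrefixOf ['\n'] (c :: rest) = false := by
          simp [List.isPrefixOf]; exact fun h' => hc h'.symm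
        simp only [hp]
        rw [if_neg (by simp)]
        rw [ih _ _ _ (by simp at h ⊢; omega)]
        have hsp : (c :: rest).splitOnP pvPc
            = (rest.splitOnP pvPc).modifyHead (List.cons c) := by
          rw [List.splitOnP_cons]; simp [pvPc, hc]
        rw [hsp, List.modifyHead_modifyHead]
        congr 1
        congr 1
        funext x
        simp

theorem pvSplitOn_eq (s : List Char) :
    PySem.Chars.splitOn s ['\n'] = s.splitOnP pvPc := by
  unfold PySem.Chars.splitOn
  rw [pvSplitOn_go_eq _ _ _ _ (by omega)]
  cases s.splitOnP pvPc <;> simp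

-- Chars.count with the one-char needle '\n' is List.count
theorem pvCount_go_eq (fuel : Nat) (l : List Char) (acc : Nat) (h : l.length ≤ fuel) :
    PySem.Chars.count.go ['\n'] fuel l acc = acc + l.count '\n' := by
  induction fuel generalizing l acc with
  | zero =>
    have : l = [] := by cases l <;> simp_all
    subst this
    rw [PySem.Chars.count.go.eq_def]; simp
  | succ fuel ih =>
    cases l with
    | nil => rw [PySem.Chars.count.go.eq_def]; simp
    | cons c rest =>
      rw [PySem.Chars.count.go.eq_def]
      by_cases hc : c = '\n'
      · subst hc
        have hp : List.isPrefixOf ['\n'] ('\n' :: rest) = true := by simp [List.isPrefixOf]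
        simp only [hp, if_pos]
        rw [ih _ _ (by simp at h ⊢; omega)]
        simp [List.count_cons]
        omega
      · have hp : List.isPrefixOf ['\n'] (c :: rest) = false := by
          simp [List.isPrefixOf]; exact fun h' => hc h'.symm
        simp only [hp]
        rw [if_neg (by simp)]
        rw [ih _ _ (by simp at h ⊢; omega)]
        simp [hc]

theorem pvCount_eq (s : List Char) : PySem.Chars.count s ['\n'] = s.count '\n' := by
  unfold PySem.Chars.count
  rw [if_neg (by simp)]
  rw [pvCount_go_eq _ _ _ (le_refl _)]; omega

-- peel the first line off a string containing a newline
theorem pvDecomp (s : List Char) (hs : '\n' ∈ s) :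
    ∃ pre t, s = pre ++ '\n' :: t ∧ '\n' ∉ pre ∧
      s.splitOnP pvPc = pre :: t.splitOnP pvPc := by
  classical
  set pre := s.takeWhile (fun x => !(x == '\n')) with hpre
  set d := s.dropWhile (fun x => !(x == '\n')) with hd
  have hdne : d ≠ [] := by
    intro h
    have := List.dropWhile_eq_nil_iff.mp h _ hs
    simp at this
  have hhead : (fun x => !(x == '\n')) (d.head hdne) = false :=
    List.head_dropWhile_not _ hdne
  have hheadc : d.head hdne = '\n' := by simpa using hhead
  have hdeq : d = '\n' :: d.tail := by
    conv_lhs => rw [← List.cons_head_tail hdne]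
    rw [hheadc]
  have hsplit : s = pre ++ '\n' :: d.tail := by
    conv_lhs => rw [← List.takeWhile_append_dropWhile (p := fun x => !(x == '\n')) (l := s)]
    rw [← hpre, ← hd]
    rw [hdeq]
    simp
  have hnot : '\n' ∉ pre := by
    intro hmem
    have := List.mem_takeWhile_imp hmem
    simp at this
  refine ⟨pre, d.tail, hsplit, hnot, ?_⟩
  conv_lhs => rw [hsplit]
  exact List.splitOnP_first _ _ (fun x hx => by
    have := List.mem_takeWhile_imp hx
    simpa [pvPc] using this) _ (by simp [pvPc]) _

-- an occurrence of the (newline-free, nonempty) marker cannot straddle a separator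
theorem pvStraddle (pre t : List Char) (j : Nat)
    (h : pvMk <+: (pre ++ '\n' :: t).drop j) :
    j + pvMk.length ≤ pre.length ∨ pre.length + 1 ≤ j := by
  by_contra hcon
  push_neg at hcon
  obtain ⟨h1, h2⟩ := hcon
  have hj : j ≤ pre.length := by omega
  have hk : pre.length - j < pvMk.length := by omega
  have hlen : pre.length - j < ((pre ++ '\n' :: t).drop j).length := by
    simp [List.length_drop]; omega
  have : pvMk[pre.length - j]'hk = ((pre ++ '\n' :: t).drop j)[pre.length - j]'hlen :=
    h.getElem hk
  rw [List.getElem_drop] at this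
  have hnl : (pre ++ '\n' :: t)[j + (pre.length - j)]'(by simp; omega) = '\n' := by
    have : j + (pre.length - j) = pre.length := by omega
    simp only [this]
    rw [List.getElem_append_right (le_refl _)]
    simp
  rw [hnl] at this
  have : '\n' ∈ pvMk := this ▸ List.getElem_mem hk
  revert this
  decide

-- every piece of splitOnP is an infix of the whole string
theorem pvPiece_infix_aux (n : Nat) : ∀ (s : List Char), s.length ≤ n →
    ∀ l ∈ s.splitOnP pvPc, l <:+: s := by
  induction n with
  | zero =>
    intro s hs l hl
    have : s = [] := by cases s <;> simp_all
    subst this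
    simp [List.splitOnP_nil] at hl
    simp [hl]
  | succ n ih =>
    intro s hs l hl
    by_cases hn : '\n' ∈ s
    · obtain ⟨pre, t, heq, hnp, hsp⟩ := pvDecomp s hn
      rw [hsp] at hl
      rcases List.mem_cons.mp hl with h | h
      · subst h
        exact (heq ▸ (List.prefix_append _ _).isInfix :)
      · have hlen : t.length ≤ n := by
          have := congrArg List.length heq
          simp at this; omega
        have := ih t hlen l h
        refine this.trans ?_
        rw [heq]
        exact ((List.suffix_cons '\n' t).trans (List.suffix_append _ _)).isInfix
    · rw [List.splitOnP_eq_single _ _ (fun x hx => by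
        simp [pvPc]; intro he; exact hn (he ▸ hx))] at hl
      simp at hl
      simp [hl]

-- an occurrence within pre extends to pre ++ rest
theorem pvOcc_pre (pre rest : List Char) (j : Nat) (hj : j + pvMk.length ≤ pre.length)
    (h : pvMk <+: pre.drop j) : pvMk <+: (pre ++ rest).drop j := by
  refine h.trans ?_
  rw [List.drop_append_of_le_length (by omega)]
  exact List.prefix_append _ _

-- an occurrence in pre ++ rest that fits inside pre is an occurrence in pre
theorem pvOcc_of_s (pre rest : List Char) (j : Nat) (hj : j + pvMk.length ≤ pre.length)
    (h : pvMk <+: (pre ++ rest).drop j) : pvMk <+: pre.drop j := by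
  refine List.prefix_of_prefix_length_le h ?_ ?_
  · rw [List.drop_append_of_le_length (by omega)]
    exact List.prefix_append _ _
  · simp [List.length_drop]; omega

-- an infix of pre occurs at a position that fits inside pre
theorem pvInfix_pos (pre : List Char) (h : pvMk <:+: pre) :
    ∃ j, j + pvMk.length ≤ pre.length ∧ pvMk <+: pre.drop j := by
  obtain ⟨t, ht, hs⟩ := List.infix_iff_prefix_suffix.mp h
  obtain ⟨u, hu⟩ := hs
  refine ⟨u.length, ?_, ?_⟩
  · have h1 := ht.length_le
    have h2 := congrArg List.length hu
    simp at h2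
    omega
  · rw [← hu, List.drop_append_of_le_length (le_refl _)]
    simpa using ht

-- M1: the marker occurs in s iff it occurs in some line of s
theorem pvInfix_iff_line_aux (n : Nat) : ∀ (s : List Char), s.length ≤ n →
    (pvMk <:+: s ↔ ∃ l ∈ s.splitOnP pvPc, pvMk <:+: l) := by
  induction n with
  | zero =>
    intro s hs
    have : s = [] := by cases s <;> simp_all
    subst this
    constructor
    · intro h; exact ⟨[], by simp [List.splitOnP_nil], h⟩
    · intro ⟨l, hl, h⟩; simp [List.splitOnP_nil] at hl; subst hl; exact h
  | succ n ih =>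
    intro s hs
    by_cases hn : '\n' ∈ s
    · obtain ⟨pre, t, heq, hnp, hsp⟩ := pvDecomp s hn
      have hlen : t.length ≤ n := by
        have := congrArg List.length heq; simp at this; omega
      constructor
      · intro h
        obtain ⟨j, hj⟩ := (PySem.Chars.exists_prefix_drop_iff_isIn pvMk s).mpr
          ((PySem.Chars.isIn_iff_infix pvMk s).mpr h)
        rw [heq] at hj
        rcases pvStraddle pre t j hj with hcase | hcase
        · have hp := pvOcc_of_s pre ('\n' :: t) j hcase hj
          refine ⟨pre, by rw [hsp]; exact List.mem_cons_self, ?_⟩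
          exact List.infix_iff_prefix_suffix.mpr ⟨pre.drop j, hp, List.drop_suffix _ _⟩
        · have hq : pvMk <+: t.drop (j - pre.length - 1) := by
            have : (pre ++ '\n' :: t).drop j = t.drop (j - pre.length - 1) := by
              rw [List.drop_append]
              have h1 : j - pre.length = j - pre.length - 1 + 1 := by omega
              rw [List.drop_eq_nil_of_le (by omega), List.nil_append, h1,
                List.drop_succ_cons]
              rfl
            rwa [this] at hj
          have hinf : pvMk <:+: t :=
            List.infix_iff_prefix_suffix.mpr ⟨t.drop _, hq, List.drop_suffix _ _⟩
          obtain ⟨l, hl, hml⟩ := (ih t hlen).mp hinf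
          exact ⟨l, by rw [hsp]; exact List.mem_cons_of_mem _ hl, hml⟩
      · intro ⟨l, hl, hml⟩
        refine hml.trans (pvPiece_infix_aux (n+1) s hs l hl)
    · constructor
      · intro h
        exact ⟨s, by rw [List.splitOnP_eq_single _ _ (fun x hx => by
            simp [pvPc]; intro he; exact hn (he ▸ hx))]; simp, h⟩
      · intro ⟨l, hl, hml⟩
        exact hml.trans (pvPiece_infix_aux (n+1) s hs l hl)

-- M2: newlines before the first occurrence count the index of the first matching line
theorem pvCount_take_aux (n : Nat) : ∀ (s : List Char), s.length ≤ n → ∀ (p : Nat),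
    pvMk <+: s.drop p → (∀ i < p, ¬ pvMk <+: s.drop i) →
    (s.take p).count '\n' = (s.splitOnP pvPc).findIdx (fun l => decide (pvMk <:+: l)) := by
  induction n with
  | zero =>
    intro s hs p h1 h2
    have : s = [] := by cases s <;> simp_all
    subst this
    have : pvMk <:+: ([] : List Char) := by
      simpa using List.infix_iff_prefix_suffix.mpr ⟨_, h1, List.drop_suffix _ _⟩
    simp at this
    rw [List.splitOnP_nil]
    simp [List.findIdx_cons, this]
  | succ n ih =>
    intro s hs p h1 h2
    by_cases hn : '\n' ∈ s
    · obtain ⟨pre, t, heq, hnp, hsp⟩ := pvDecomp s hn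
      have hlen : t.length ≤ n := by
        have := congrArg List.length heq; simp at this; omega
      rcases pvStraddle pre t p (heq ▸ h1) with hcase | hcase
      · -- occurrence inside pre: the first line matches
        have hml : pvMk <+: pre.drop p := pvOcc_of_s pre ('\n' :: t) p hcase (heq ▸ h1)
        have hinf : pvMk <:+: pre :=
          List.infix_iff_prefix_suffix.mpr ⟨pre.drop p, hml, List.drop_suffix _ _⟩
        rw [hsp]
        rw [List.findIdx_cons]
        simp only [hinf, decide_true, cond_true]
        have htake : s.take p = pre.take p := by
          rw [heq, List.take_append_of_le_length (by omega)]
        rw [htake, List.count_eq_zero.mpr (fun hm => hnp (List.take_subset _ _ hm))]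
      · -- occurrence inside t: recurse into the tail
        have hq1 : pvMk <+: t.drop (p - pre.length - 1) := by
          have hdrop : (pre ++ '\n' :: t).drop p = t.drop (p - pre.length - 1) := by
            rw [List.drop_append]
            have h1' : p - pre.length = p - pre.length - 1 + 1 := by omega
            rw [List.drop_eq_nil_of_le (by omega), List.nil_append, h1',
              List.drop_succ_cons]
            rfl
          rw [heq] at h1; rwa [hdrop] at h1
        have hq2 : ∀ i < p - pre.length - 1, ¬ pvMk <+: t.drop i := by
          intro i hi hpre
          have hdrop : (pre ++ '\n' :: t).drop (pre.length + 1 + i) = t.drop i := by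
            rw [List.drop_append]
            have : pre.length + 1 + i - pre.length = i + 1 := by omega
            rw [List.drop_eq_nil_of_le (by omega), List.nil_append, this,
              List.drop_succ_cons]
          exact h2 (pre.length + 1 + i) (by omega) (by rw [heq, hdrop]; exact hpre)
        have hnpre : ¬ pvMk <:+: pre := by
          intro hinf
          obtain ⟨j, hj1, hj2⟩ := pvInfix_pos pre hinf
          have : pvMk <+: s.drop j := by
            rw [heq]; exact pvOcc_pre pre ('\n' :: t) j hj1 hj2
          have hmk : 0 < pvMk.length := by decide
          exact h2 j (by omega) this
        rw [hsp, List.findIdx_cons]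
        simp only [hnpre, decide_false, cond_false]
        rw [← ih t hlen _ hq1 hq2]
        have htake : s.take p = pre ++ '\n' :: t.take (p - pre.length - 1) := by
          rw [heq, List.take_append]
          have h1' : p - pre.length = p - pre.length - 1 + 1 := by omega
          rw [List.take_of_length_le (by omega), h1', List.take_succ_cons]
          rfl
        rw [htake]
        rw [List.count_append, List.count_cons]
        rw [List.count_eq_zero.mpr hnp]
        simp
    · have hinf : pvMk <:+: s :=
        List.infix_iff_prefix_suffix.mpr ⟨s.drop p, h1, List.drop_suffix _ _⟩
      rw [List.splitOnP_eq_single _ _ (fun x hx => by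
        simp [pvPc]; intro he; exact hn (he ▸ hx))]
      rw [List.findIdx_cons]
      simp only [hinf, decide_true, cond_true]
      exact List.count_eq_zero.mpr (fun hm => hn (List.take_subset _ _ hm))

-- A's loop when no line matches
theorem pvALoop_none (lines : List String) (suffix : List String) (k : Int)
    (h : ∀ l ∈ suffix, PySem.Str.isIn "id=\"next-btn\"" l = false) :
    pvALoop lines (PySem.List.enumerate suffix k) = "" := by
  induction suffix generalizing k with
  | nil => rw [PySem.List.enumerate_nil]; rfl
  | cons x rest ih =>
    rw [PySem.List.enumerate_cons]
    show pvALoop lines ((k, x) :: PySem.List.enumerate rest (k+1)) = ""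
    unfold pvALoop
    rw [if_neg (by rw [h x List.mem_cons_self]; simp)]
    exact ih (k+1) (fun l hl => h l (List.mem_cons_of_mem _ hl))

-- A's loop when some line matches: it stops at the first matching index
theorem pvALoop_some (lines : List String) (suffix : List String) (k : Int)
    (h : ∃ l ∈ suffix, PySem.Str.isIn "id=\"next-btn\"" l = true) :
    pvALoop lines (PySem.List.enumerate suffix k)
      = (let i := k + (suffix.findIdx (fun l => PySem.Str.isIn "id=\"next-btn\"" l) : Int)
         let start := max 0 (i - 5)
         let stop := min (lines.length : Int) (i + 10)
         PySem.Str.join "\n" (PySem.List.slice lines (some start) (some stop))) := by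
  induction suffix generalizing k with
  | nil => simp at h
  | cons x rest ih =>
    rw [PySem.List.enumerate_cons]
    show pvALoop lines ((k, x) :: PySem.List.enumerate rest (k+1)) = _
    unfold pvALoop
    by_cases hx : PySem.Str.isIn "id=\"next-btn\"" x = true
    · rw [if_pos hx]
      simp only [List.findIdx_cons, hx, cond_true]
      norm_num
    · rw [if_neg hx]
      have hrest : ∃ l ∈ rest, PySem.Str.isIn "id=\"next-btn\"" l = true := by
        rcases h with ⟨l, hl, hli⟩
        rcases List.mem_cons.mp hl with rfl | hl'
        · exact absurd hli hx
        · exact ⟨l, hl', hli⟩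
      rw [ih (k+1) hrest]
      simp only [List.findIdx_cons, hx, cond_false]
      have : k + 1 + ((rest.findIdx (fun l => PySem.Str.isIn "id=\"next-btn\"" l) : Int))
          = k + ((rest.findIdx (fun l => PySem.Str.isIn "id=\"next-btn\"" l) + 1 : Nat) : Int) := by
        push_cast; ring
      rw [this]

theorem pvIsIn_eq_decide (l : List Char) :
    PySem.Chars.isIn pvMk l = decide (pvMk <:+: l) := by
  by_cases h : pvMk <:+: l
  · simp [h, PySem.Chars.isIn_iff_infix]
  · simp [h]
    exact (PySem.Chars.isIn_eq_false_iff _ _).mpr h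

theorem pvLines_eq (html : String) :
    (PySem.Str.split? html "\n").getD []
      = (html.toList.splitOnP pvPc).map String.ofList := by
  unfold PySem.Str.split? PySem.Chars.split?
  have hnl : "\n".toList = ['\n'] := by decide
  rw [hnl]
  rw [if_neg (by decide)]
  rw [pvSplitOn_eq]
  rfl

theorem pvMarker_toList : ("id=\"next-btn\"" : String).toList = pvMk := rfl

theorem pvFinal (html : String) :
    extract_next_button_section_py html = extract_next_button_section_py_alt html := by
  unfold extract_next_button_section_py extract_next_button_section_py_alt
  simp only [pvLines_eq]
  by_cases hocc : pvMk <:+: html.toList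
  · -- the marker occurs somewhere in html
    have hge : 0 ≤ PySem.Chars.find html.toList pvMk :=
      (PySem.Chars.find_nonneg_iff _ _).mpr hocc
    have hfind : PySem.Str.find html "id=\"next-btn\"" = PySem.Chars.find html.toList pvMk := by
      rw [PySem.Str.find_eq, pvMarker_toList]
    rw [hfind]
    rw [if_neg (by simp; omega)]
    obtain ⟨hpre, hmin⟩ := PySem.Chars.find_spec (s := html.toList) (sub := pvMk) hge
    have hcount : PySem.Str.count
        (PySem.Str.slice html none (some (PySem.Chars.find html.toList pvMk))) "\n"
        = (html.toList.splitOnP pvPc).findIdx (fun l => decide (pvMk <:+: l)) := by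
      rw [PySem.Str.count_eq, PySem.Str.toList_slice]
      have h1 : ("\n" : String).toList = ['\n'] := by decide
      rw [h1]
      rw [PySem.Chars.slice_eq_listSlice, PySem.List.slice_to _ hge, pvCount_eq]
      exact pvCount_take_aux html.toList.length html.toList le_rfl _ hpre hmin
    have hex : ∃ l ∈ (html.toList.splitOnP pvPc).map String.ofList,
        PySem.Str.isIn "id=\"next-btn\"" l = true := by
      obtain ⟨l0, hl0, hinf⟩ :=
        (pvInfix_iff_line_aux html.toList.length html.toList le_rfl).mp hocc
      refine ⟨String.ofList l0, List.mem_map_of_mem hl0, ?_⟩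
      rw [PySem.Str.isIn_eq, pvMarker_toList, String.toList_ofList, pvIsIn_eq_decide]
      simpa using hinf
    rw [pvALoop_some _ _ _ hex]
    have hidx : ((((html.toList.splitOnP pvPc).map String.ofList).findIdx
        (fun l => PySem.Str.isIn "id=\"next-btn\"" l)) : Int)
        = (PySem.Str.count (PySem.Str.slice html none
            (some (PySem.Chars.find html.toList pvMk))) "\n" : Int) := by
      rw [hcount, List.findIdx_map]
      congr 1
      congr 1
      funext l0
      show PySem.Str.isIn "id=\"next-btn\"" (String.ofList l0) = _
      rw [PySem.Str.isIn_eq, pvMarker_toList, String.toList_ofList, pvIsIn_eq_decide]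
    simp only [zero_add]
    rw [hidx]
  · -- no marker anywhere: A's loop falls through, B's find is -1
    have hfind : PySem.Str.find html "id=\"next-btn\"" = -1 := by
      rw [PySem.Str.find_eq, pvMarker_toList]
      exact (PySem.Chars.find_eq_neg_one_iff _ _).mpr hocc
    rw [hfind]
    rw [if_pos (by simp)]
    apply pvALoop_none
    intro l hl
    obtain ⟨l0, hl0, rfl⟩ := List.mem_map.mp hl
    rw [PySem.Str.isIn_eq, pvMarker_toList, String.toList_ofList, pvIsIn_eq_decide]
    simp only [decide_eq_false_iff_not]
    intro hinf
    exact hocc ((pvInfix_iff_line_aux html.toList.length html.toList le_rfl).mpr ⟨l0, hl0, hinf⟩)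

-- ===== VERDICT (by name: the statement is the Claim_ definition above) =====
theorem extract_next_button_section_py_spec : Claim_equal_extract_next_button_section_py := by
  intro html _
  unfold Spec_extract_next_button_section_py
  exact pvFinal html
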